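-- pv_equiv track=rewrite | github.com/yuvallangerontheroad/dabbling | dabbling/dragon_curve.py | dragon_curve
-- ===== SOURCE A (Python) =====
-- from typing import List, Tuple
--
-- PathType = List[Tuple[int, int]]
--
-- def ccw(p: Tuple[int, int]) -> Tuple[int, int]:
--     return [-p[1], p[0]]
--
-- def dragon_curve(generation_number: int) -> PathType:
--     l = [[0, 0], [1, 0]]
--
--     for i in range(generation_number):
--         new_portion = [ccw(n) for n in l[1:]]
--         new_pivot = new_portion[-1]
--         l = new_portion[::-1] + l
--         l = [
--                 [n[0] - new_pivot[0],
--                     n[1] - new_pivot[1]]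
--                 for n in l]
--
--     return l
-- ===== SOURCE B (Python) =====
-- from typing import List, Tuple
--
-- PathType = List[Tuple[int, int]]
--
--
-- def dragon_curve(generation_number: int) -> PathType:
--     if generation_number <= 0:
--         return [[0, 0], [1, 0]]
--     # Self-similar turn sequence: seq_n = complemented-reversed(seq_{n-1}) + [left] + seq_{n-1}
--     turns = []
--     for _ in range(generation_number):
--         turns = [not t for t in reversed(turns)] + [True] + turns
--     # Walk: start at (0, 0) heading south, take one step, then turn-and-step per entry.
--     x, y = 0, 0
--     dx, dy = 0, -1
--     path = [[0, 0]]
--     x, y = x + dx, y + dy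
--     path.append([x, y])
--     for t in turns:
--         if t:
--             dx, dy = -dy, dx   # left (ccw)
--         else:
--             dx, dy = dy, -dx   # right (cw)
--         x, y = x + dx, y + dy
--         path.append([x, y])
--     return path
-- ===== Notes on version B (the rewrite author's own statement) =====
-- stated objective: alternative
-- what changed: Replaces A's repeated rotate-reverse-translate of the whole point list with the self-similar dragon turn sequence (revcomp(s)+[L]+s) walked once by a cursor from (0,0) heading south.
import Mathlib
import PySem

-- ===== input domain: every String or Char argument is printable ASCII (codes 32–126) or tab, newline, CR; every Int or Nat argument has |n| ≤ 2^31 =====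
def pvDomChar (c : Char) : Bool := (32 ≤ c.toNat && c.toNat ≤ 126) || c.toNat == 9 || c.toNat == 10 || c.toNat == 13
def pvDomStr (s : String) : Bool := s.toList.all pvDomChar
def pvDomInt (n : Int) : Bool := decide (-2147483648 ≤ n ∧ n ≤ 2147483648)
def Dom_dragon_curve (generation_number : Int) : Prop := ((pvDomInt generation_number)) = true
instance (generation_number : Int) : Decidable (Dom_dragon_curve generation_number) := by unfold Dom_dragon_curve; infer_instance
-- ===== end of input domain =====

-- B replaces A's per-generation rotate-reverse-translate of the whole point list by the
-- self-similar dragon turn sequence walked once by a cursor (alternative algorithm, same cost).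

-- ===== PORT A =====
def pvCcwA (p : Int × Int) : Int × Int := (-p.2, p.1)

def dragonStep (l : List (Int × Int)) : List (Int × Int) :=
  let new_portion := (PySem.List.slice l (some 1) none).map pvCcwA
  match PySem.List.pyGet? new_portion (-1) with
  | some new_pivot =>
      let rev :=
        match PySem.List.slice? new_portion none none (-1) with
        | some r => r
        | none => []
      (rev ++ l).map (fun n => (n.1 - new_pivot.1, n.2 - new_pivot.2))
  | none => []   -- unreachable: new_portion is nonempty in every iteration (l always has ≥ 2 points)

def dragon_curve (generation_number : Int) : List (Int × Int) :=
  (PySem.List.pyRange 0 generation_number 1).foldl (fun l _ => dragonStep l) [(0, 0), (1, 0)]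

-- ===== PORT B =====
def pvRot (t : Bool) (h : Int × Int) : Int × Int := if t then (-h.2, h.1) else (h.2, -h.1)

-- Source B's 'for t in turns: … path.append([x, y])' loop: tail-recursive accumulator, reversed at the end
def pvWalkAux (path : List (Int × Int)) (p h : Int × Int) : List Bool → List (Int × Int)
  | [] => path.reverse
  | t :: ts =>
      let h' := pvRot t h
      let p' := (p.1 + h'.1, p.2 + h'.2)
      pvWalkAux (p' :: path) p' h' ts

def dragon_curve_alt (generation_number : Int) : List (Int × Int) :=
  if generation_number ≤ 0 then [(0, 0), (1, 0)]
  else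
    let turns := (PySem.List.pyRange 0 generation_number 1).foldl
      (fun ts _ => ts.reverse.map not ++ true :: ts) ([] : List Bool)
    pvWalkAux [(0, -1), (0, 0)] (0, -1) (0, -1) turns

-- ===== PRECONDITION & SPEC =====
def Spec_dragon_curve (generation_number : Int) (out : List (Int × Int)) : Prop := out = dragon_curve_alt generation_number
instance (generation_number : Int) (out : List (Int × Int)) : Decidable (Spec_dragon_curve generation_number out) := by unfold Spec_dragon_curve; infer_instance

-- ===== CLAIM (what is proved, stated in full; the proofs are below) =====
def Claim_equal_dragon_curve : Prop := ∀ (generation_number : Int), Dom_dragon_curve generation_number → Spec_dragon_curve generation_number (dragon_curve generation_number)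

-- ===== LEMMAS AND PROOFS =====

def pvPadd (a b : Int × Int) : Int × Int := (a.1 + b.1, a.2 + b.2)
def pvPsub (a b : Int × Int) : Int × Int := (a.1 - b.1, a.2 - b.2)
def pvCw (h : Int × Int) : Int × Int := (h.2, -h.1)
def pvRevc (ts : List Bool) : List Bool := ts.reverse.map not
def pvStepT (ts : List Bool) : List Bool := ts.reverse.map not ++ true :: ts
def pvSeq (n : Nat) : List Bool := pvStepT^[n] []

def pvEndH (h : Int × Int) : List Bool → Int × Int
  | [] => h
  | t :: ts => pvEndH (pvRot t h) ts

def pvEndP (p h : Int × Int) : List Bool → Int × Int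
  | [] => p
  | t :: ts => pvEndP (pvPadd p (pvRot t h)) (pvRot t h) ts

def pvWalk : (Int × Int) → (Int × Int) → List Bool → List (Int × Int)
  | _, _, [] => []
  | p, h, t :: ts =>
      let h' := pvRot t h
      let p' := (p.1 + h'.1, p.2 + h'.2)
      p' :: pvWalk p' h' ts

theorem pvWalkAux_eq (ts : List Bool) (acc : List (Int × Int)) (p h : Int × Int) :
    pvWalkAux acc p h ts = acc.reverse ++ pvWalk p h ts := by
  induction ts generalizing acc p h with
  | nil => simp [pvWalkAux, pvWalk]
  | cons t ts ih => simp [pvWalkAux, pvWalk, ih]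

theorem pvWalk_cons (p h : Int × Int) (t : Bool) (ts : List Bool) :
    pvWalk p h (t :: ts) = pvPadd p (pvRot t h) :: pvWalk (pvPadd p (pvRot t h)) (pvRot t h) ts := rfl

theorem pvRevc_cons (t : Bool) (ts : List Bool) : pvRevc (t :: ts) = pvRevc ts ++ [!t] := by
  simp [pvRevc]

theorem rot_notrot (t : Bool) (h : Int × Int) : pvRot (!t) (pvCw (pvRot t h)) = pvCw h := by
  cases t <;> simp [pvRot, pvCw]

theorem endH_append (ts us : List Bool) (h : Int × Int) :
    pvEndH h (ts ++ us) = pvEndH (pvEndH h ts) us := by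
  induction ts generalizing h with
  | nil => rfl
  | cons t ts ih => simp [pvEndH, ih]

theorem endP_append (ts us : List Bool) (p h : Int × Int) :
    pvEndP p h (ts ++ us) = pvEndP (pvEndP p h ts) (pvEndH h ts) us := by
  induction ts generalizing p h with
  | nil => rfl
  | cons t ts ih => simp [pvEndP, pvEndH, ih]

theorem walk_append (ts us : List Bool) (p h : Int × Int) :
    pvWalk p h (ts ++ us) = pvWalk p h ts ++ pvWalk (pvEndP p h ts) (pvEndH h ts) us := by
  induction ts generalizing p h with
  | nil => rfl
  | cons t ts ih => simp [pvWalk_cons, pvEndP, pvEndH, ih]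

theorem walk_psub (ts : List Bool) (p v h : Int × Int) :
    pvWalk (pvPsub p v) h ts = (pvWalk p h ts).map (fun q => pvPsub q v) := by
  induction ts generalizing p h with
  | nil => rfl
  | cons t ts ih =>
      rw [pvWalk_cons, pvWalk_cons]
      have hp : pvPadd (pvPsub p v) (pvRot t h) = pvPsub (pvPadd p (pvRot t h)) v := by
        simp [pvPadd, pvPsub]; constructor <;> ring
      simp [hp, ih]

theorem endP_psub (ts : List Bool) (p v h : Int × Int) :
    pvEndP (pvPsub p v) h ts = pvPsub (pvEndP p h ts) v := by
  induction ts generalizing p h with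
  | nil => rfl
  | cons t ts ih =>
      have hp : pvPadd (pvPsub p v) (pvRot t h) = pvPsub (pvPadd p (pvRot t h)) v := by
        simp [pvPadd, pvPsub]; constructor <;> ring
      simp [pvEndP, hp, ih]

theorem endH_revc (ts : List Bool) (h : Int × Int) :
    pvEndH (pvCw (pvEndH h ts)) (pvRevc ts) = pvCw h := by
  induction ts generalizing h with
  | nil => rfl
  | cons t ts ih =>
      rw [pvRevc_cons]
      show pvEndH (pvCw (pvEndH (pvRot t h) ts)) (pvRevc ts ++ [!t]) = pvCw h
      rw [endH_append, ih (pvRot t h)]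
      show pvRot (!t) (pvCw (pvRot t h)) = pvCw h
      exact rot_notrot t h

theorem endP_revc (ts : List Bool) (a h : Int × Int) :
    pvEndP (pvCcwA (pvPsub (pvEndP (pvPadd a h) h ts) (pvEndH h ts))) (pvCw (pvEndH h ts)) (pvRevc ts)
      = pvCcwA a := by
  induction ts generalizing a h with
  | nil =>
      simp [pvEndP, pvEndH, pvRevc, pvCcwA, pvPsub, pvPadd]
  | cons t ts ih =>
      rw [pvRevc_cons]
      show pvEndP (pvCcwA (pvPsub (pvEndP (pvPadd (pvPadd a h) (pvRot t h)) (pvRot t h) ts)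
              (pvEndH (pvRot t h) ts))) (pvCw (pvEndH (pvRot t h) ts)) (pvRevc ts ++ [!t]) = pvCcwA a
      rw [endP_append, ih (pvPadd a h) (pvRot t h), endH_revc ts (pvRot t h)]
      show pvPadd (pvCcwA (pvPadd a h)) (pvRot (!t) (pvCw (pvRot t h))) = pvCcwA a
      rw [rot_notrot t h]
      simp [pvPadd, pvCcwA, pvCw]

theorem map_ccw_reverse (ts : List Bool) (a h : Int × Int) :
    ((a :: pvPadd a h :: pvWalk (pvPadd a h) h ts).map pvCcwA).reverse
      = pvCcwA (pvEndP (pvPadd a h) h ts)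
        :: pvCcwA (pvPsub (pvEndP (pvPadd a h) h ts) (pvEndH h ts))
        :: pvWalk (pvCcwA (pvPsub (pvEndP (pvPadd a h) h ts) (pvEndH h ts))) (pvCw (pvEndH h ts)) (pvRevc ts) := by
  induction ts generalizing a h with
  | nil =>
      simp [pvWalk, pvEndP, pvEndH, pvRevc, pvPsub, pvPadd, pvCcwA]
  | cons t ts ih =>
      rw [pvWalk_cons, pvRevc_cons]
      have hEP : pvEndP (pvPadd a h) h (t :: ts)
          = pvEndP (pvPadd (pvPadd a h) (pvRot t h)) (pvRot t h) ts := rfl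
      have hEH : pvEndH h (t :: ts) = pvEndH (pvRot t h) ts := rfl
      rw [hEP, hEH]
      have lhs : ((a :: pvPadd a h :: pvPadd (pvPadd a h) (pvRot t h)
            :: pvWalk (pvPadd (pvPadd a h) (pvRot t h)) (pvRot t h) ts).map pvCcwA).reverse
          = ((pvPadd a h :: pvPadd (pvPadd a h) (pvRot t h)
              :: pvWalk (pvPadd (pvPadd a h) (pvRot t h)) (pvRot t h) ts).map pvCcwA).reverse
            ++ [pvCcwA a] := by
        simp
      rw [lhs, ih (pvPadd a h) (pvRot t h)]
      rw [walk_append, endP_revc ts (pvPadd a h) (pvRot t h), endH_revc ts (pvRot t h)]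
      have hpt : pvWalk (pvCcwA (pvPadd a h)) (pvCw (pvRot t h)) [!t] = [pvCcwA a] := by
        rw [pvWalk_cons, rot_notrot t h]
        have : pvPadd (pvCcwA (pvPadd a h)) (pvCw h) = pvCcwA a := by
          simp [pvPadd, pvCcwA, pvCw]
        simp [pvWalk, this]
      rw [hpt]
      simp

theorem getLast?_walk (ts : List Bool) (p h : Int × Int) :
    (p :: pvWalk p h ts).getLast? = some (pvEndP p h ts) := by
  induction ts generalizing p h with
  | nil => rfl
  | cons t ts ih =>
      rw [pvWalk_cons, List.getLast?_cons_cons]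
      exact ih (pvPadd p (pvRot t h)) (pvRot t h)

theorem dragonStep_walk (ts : List Bool) (hF : pvEndH ((0 : Int), (-1 : Int)) ts = (1, 0)) :
    dragonStep ((0, 0) :: (0, -1) :: pvWalk (0, -1) (0, -1) ts)
      = (0, 0) :: (0, -1) :: pvWalk (0, -1) (0, -1) (pvStepT ts) := by
  have hE := getLast?_walk ts ((0 : Int), (-1 : Int)) ((0 : Int), (-1 : Int))
  set E := pvEndP ((0 : Int), (-1 : Int)) ((0 : Int), (-1 : Int)) ts with hEdef
  set W := pvWalk ((0 : Int), (-1 : Int)) ((0 : Int), (-1 : Int)) ts with hWdef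
  have hlast : ((((0 : Int), (-1 : Int)) :: W).map pvCcwA).getLast? = some (pvCcwA E) := by
    rw [List.getLast?_map, hE]; rfl
  simp only [dragonStep, PySem.List.slice_from_one, List.tail_cons, PySem.List.pyGet?_neg_one,
    hlast, PySem.List.slice?_none_none_neg_one]
  -- rewrite the reversed rotated list via the reflection lemma
  have hM := map_ccw_reverse ts ((0 : Int), (0 : Int)) ((0 : Int), (-1 : Int))
  have hpadd : pvPadd ((0 : Int), (0 : Int)) ((0 : Int), (-1 : Int)) = ((0 : Int), (-1 : Int)) := by
    simp [pvPadd]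
  rw [hpadd, hF, ← hEdef, ← hWdef] at hM
  have hsplit : ((((0 : Int), (0 : Int)) :: ((0 : Int), (-1 : Int)) :: W).map pvCcwA).reverse
      = ((((0 : Int), (-1 : Int)) :: W).map pvCcwA).reverse ++ [((0 : Int), (0 : Int))] := by
    simp [pvCcwA]
  have hkey : ((((0 : Int), (-1 : Int)) :: W).map pvCcwA).reverse
        ++ (((0 : Int), (0 : Int)) :: ((0 : Int), (-1 : Int)) :: W)
      = (pvCcwA E :: pvCcwA (pvPsub E (1, 0))
          :: pvWalk (pvCcwA (pvPsub E (1, 0))) (pvCw (1, 0)) (pvRevc ts))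
        ++ (((0 : Int), (-1 : Int)) :: W) := by
    rw [List.append_cons, ← hsplit, hM]
  rw [hkey]
  have hfun : (fun n : Int × Int => (n.1 - (pvCcwA E).1, n.2 - (pvCcwA E).2))
      = (fun q => pvPsub q (pvCcwA E)) := rfl
  rw [hfun]
  -- arithmetic facts
  have h1 : pvPsub (pvCcwA E) (pvCcwA E) = ((0 : Int), (0 : Int)) := by simp [pvPsub]
  have hX : pvPsub (pvCcwA (pvPsub E (1, 0))) (pvCcwA E) = ((0 : Int), (-1 : Int)) := by
    simp [pvPsub, pvCcwA]
  have hcw : pvCw ((1 : Int), (0 : Int)) = ((0 : Int), (-1 : Int)) := rfl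
  have hRevE : pvEndP (pvCcwA (pvPsub E (1, 0))) ((0 : Int), (-1 : Int)) (pvRevc ts)
      = ((0 : Int), (0 : Int)) := by
    have h := endP_revc ts ((0 : Int), (0 : Int)) ((0 : Int), (-1 : Int))
    rw [hpadd, hF, ← hEdef, hcw] at h
    simpa [pvCcwA] using h
  have hH2 : pvEndH ((0 : Int), (-1 : Int)) (pvRevc ts) = ((-1 : Int), (0 : Int)) := by
    have h := endH_revc ts ((0 : Int), (-1 : Int))
    rw [hF, hcw] at h
    simpa [pvCw] using h
  have hP2 : pvEndP ((0 : Int), (-1 : Int)) ((0 : Int), (-1 : Int)) (pvRevc ts)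
      = pvPsub ((0 : Int), (0 : Int)) (pvCcwA E) := by
    nth_rewrite 1 [← hX]
    rw [endP_psub, hRevE]
  -- the right-hand side, split at the middle turn
  have hstep : pvStepT ts = pvRevc ts ++ true :: ts := rfl
  rw [hstep, walk_append, hH2, hP2, pvWalk_cons]
  have hrot : pvRot true ((-1 : Int), (0 : Int)) = ((0 : Int), (-1 : Int)) := rfl
  rw [hrot]
  have hpp : pvPadd (pvPsub ((0 : Int), (0 : Int)) (pvCcwA E)) ((0 : Int), (-1 : Int))
      = pvPsub ((0 : Int), (-1 : Int)) (pvCcwA E) := by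
    simp [pvPadd, pvPsub]
    ring
  rw [hpp]
  -- translate the two walks
  simp only [List.map_cons, List.map_append, h1, hX]
  rw [hWdef, ← walk_psub, ← walk_psub, hX, hcw]
  simp

theorem endH_stepT (ts : List Bool) (hF : pvEndH ((0 : Int), (-1 : Int)) ts = (1, 0)) :
    pvEndH ((0 : Int), (-1 : Int)) (pvStepT ts) = (1, 0) := by
  have h1 : pvStepT ts = pvRevc ts ++ true :: ts := rfl
  rw [h1, endH_append]
  have h2 : pvEndH ((0 : Int), (-1 : Int)) (pvRevc ts) = (-1, 0) := by
    have := endH_revc ts ((0 : Int), (-1 : Int))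
    rw [hF] at this
    simpa [pvCw] using this
  rw [h2]
  show pvEndH (pvRot true (-1, 0)) ts = (1, 0)
  simpa [pvRot] using hF

theorem main_inv (n : Nat) :
    dragonStep^[n + 1] [((0 : Int), (0 : Int)), (1, 0)]
        = (0, 0) :: (0, -1) :: pvWalk (0, -1) (0, -1) (pvSeq (n + 1))
      ∧ pvEndH ((0 : Int), (-1 : Int)) (pvSeq (n + 1)) = (1, 0) := by
  induction n with
  | zero => constructor <;> decide
  | succ n ih =>
      have hseq : pvSeq (n + 2) = pvStepT (pvSeq (n + 1)) := Function.iterate_succ_apply' _ _ _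
      constructor
      · rw [Function.iterate_succ_apply', ih.1, dragonStep_walk _ ih.2, hseq]
      · rw [hseq]; exact endH_stepT _ ih.2

theorem foldl_const {α β : Type} (f : α → α) (xs : List β) (init : α) :
    xs.foldl (fun l _ => f l) init = f^[xs.length] init := by
  induction xs generalizing init with
  | nil => rfl
  | cons x xs ih => simp [List.foldl_cons, ih, Function.iterate_succ_apply]

-- ===== VERDICT (by name: the statement is the Claim_ definition above) =====
theorem dragon_curve_spec : Claim_equal_dragon_curve := by
  intro g _
  unfold Spec_dragon_curve dragon_curve dragon_curve_alt
  by_cases hg : g ≤ 0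
  · rw [PySem.List.pyRange_one_eq_nil hg]
    simp [hg]
  · push Not at hg
    rw [if_neg (by omega)]
    rw [foldl_const dragonStep, foldl_const (fun ts : List Bool => ts.reverse.map not ++ true :: ts)]
    have hlen : (PySem.List.pyRange 0 g 1).length = g.toNat := by
      simp [PySem.List.length_pyRange_one]
    obtain ⟨n, hn⟩ : ∃ n, g.toNat = n + 1 := ⟨g.toNat - 1, by omega⟩
    rw [hlen, hn]
    have hB : (fun ts : List Bool => ts.reverse.map not ++ true :: ts) = pvStepT := rfl
    rw [hB, pvWalkAux_eq]
    simpa using (main_inv n).1
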